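-- pv_equiv track=rewrite | github.com/weslleyisidorio/lista03-DOT | a03q15.py | ordCont
-- ===== SOURCE A (Python) =====
-- def ordCont(lista):
--     saida = []
--     listaOrd = sorted(lista, reverse=True)
--     for elemento in listaOrd:
--         tupla = (elemento, listaOrd.count(elemento))
--         if tupla not in saida:
--             saida.append(tupla)
--
--     return saida
-- ===== SOURCE B (Python) =====
-- def ordCont(lista):
--     s = sorted(lista, reverse=True)
--     saida = []
--     i = 0
--     while i < len(s):
--         j = i + 1
--         while j < len(s) and s[j] == s[i]:
--             j += 1
--         saida.append((s[i], j - i))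
--         i = j
--     return saida
-- ===== Notes on version B (the rewrite author's own statement) =====
-- stated objective: faster
-- what changed: Replaces A's per-element listaOrd.count rescan and 'tupla not in saida' dedup scan by a single run-grouping walk over the descending-sorted list, emitting (value, run length) once per maximal run.
import Mathlib
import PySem

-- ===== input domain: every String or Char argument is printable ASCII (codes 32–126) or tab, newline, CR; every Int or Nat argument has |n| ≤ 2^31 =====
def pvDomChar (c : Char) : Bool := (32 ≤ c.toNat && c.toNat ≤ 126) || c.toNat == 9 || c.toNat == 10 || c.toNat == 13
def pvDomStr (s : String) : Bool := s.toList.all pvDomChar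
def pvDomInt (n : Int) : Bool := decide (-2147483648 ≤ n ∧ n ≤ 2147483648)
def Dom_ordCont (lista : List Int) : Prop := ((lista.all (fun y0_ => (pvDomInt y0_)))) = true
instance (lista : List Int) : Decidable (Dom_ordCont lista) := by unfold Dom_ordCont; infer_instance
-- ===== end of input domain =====

-- B replaces A's quadratic count/dedup rescans by a single run-grouping walk over the
-- descending-sorted list (objective: faster, O(n^2) -> O(n log n)).

-- ===== PORT A =====
def ordCont (lista : List Int) : List (Int × Int) :=
  let listaOrd := PySem.List.sorted lista (fun x => x) true
  listaOrd.foldl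
    (fun saida elemento =>
      let tupla : Int × Int := (elemento, (listaOrd.count elemento : Int))
      if tupla ∈ saida then saida else saida ++ [tupla])
    []

-- ===== PORT B =====
-- the outer while loop of Source B: each step consumes one maximal run s[i..j) of equal values
def ordContRuns : List Int → List (Int × Int)
  | [] => []
  | x :: xs =>
    let r := xs.takeWhile (fun y => y == x)   -- the inner while loop: j - i - 1 further equal elements
    (x, 1 + (r.length : Int)) :: ordContRuns (xs.drop r.length)
termination_by l => l.length
decreasing_by
  simp [List.length_drop]

def ordCont_alt (lista : List Int) : List (Int × Int) :=
  ordContRuns (PySem.List.sorted lista (fun x => x) true)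

-- ===== PRECONDITION & SPEC =====
def Spec_ordCont (lista : List Int) (out : List (Int × Int)) : Prop := out = ordCont_alt lista
instance (lista : List Int) (out : List (Int × Int)) : Decidable (Spec_ordCont lista out) := by unfold Spec_ordCont; infer_instance

-- ===== CLAIM (what is proved, stated in full; the proofs are below) =====
def Claim_equal_ordCont : Prop := ∀ (lista : List Int), Dom_ordCont lista → Spec_ordCont lista (ordCont lista)

-- ===== LEMMAS AND PROOFS =====

-- elements dropped past the head-run of a descending-sorted list are strictly below the head value
theorem pv_dropWhile_lt (x : Int) :
    ∀ (xs : List Int), xs.Pairwise (fun a b => b ≤ a) → (∀ e ∈ xs, e ≤ x) →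
      ∀ e ∈ xs.dropWhile (fun y => y == x), e < x := by
  intro xs
  induction xs with
  | nil => intro _ _ e he; simp [List.dropWhile] at he
  | cons y ys ih =>
    intro hp hle e he
    rw [List.pairwise_cons] at hp
    by_cases hy : y = x
    · subst hy
      rw [List.dropWhile_cons_of_pos (by simp)] at he
      exact ih hp.2 (fun e' he' => hle e' (List.mem_cons_of_mem _ he')) e he
    · rw [List.dropWhile_cons_of_neg (by simp [hy])] at he
      have hylt : y < x := lt_of_le_of_ne (hle y (List.mem_cons_self)) hy
      rcases List.mem_cons.mp he with rfl | he'
      · exact hylt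
      · exact lt_of_le_of_lt (hp.1 e he') hylt

-- folding A's body over a run of copies of x whose tuple is already present in acc leaves acc unchanged
theorem pv_fold_run (cnt : Int → Int) (x : Int) :
    ∀ (r : List Int) (acc : List (Int × Int)), (∀ e ∈ r, e = x) → (x, cnt x) ∈ acc →
      r.foldl
        (fun saida elemento =>
          let tupla : Int × Int := (elemento, cnt elemento)
          if tupla ∈ saida then saida else saida ++ [tupla]) acc = acc := by
  intro r
  induction r with
  | nil => intro acc _ _; rfl
  | cons e es ih =>
    intro acc hall hm
    have he : e = x := hall e List.mem_cons_self
    subst he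
    simp only [List.foldl_cons, if_pos hm]
    exact ih acc (fun e' he' => hall e' (List.mem_cons_of_mem _ he')) hm

-- main invariant: on a descending-sorted list whose counts cnt agrees with, A's dedup fold
-- appends exactly the run list of B
theorem pv_main_aux (cnt : Int → Int) :
    ∀ (n : Nat) (l : List Int), l.length ≤ n → l.Pairwise (fun a b => b ≤ a) →
      (∀ e ∈ l, cnt e = (l.count e : Int)) →
      ∀ (acc : List (Int × Int)), (∀ p ∈ acc, ∀ e ∈ l, p.1 ≠ e) →
      l.foldl
        (fun saida elemento =>
          let tupla : Int × Int := (elemento, cnt elemento)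
          if tupla ∈ saida then saida else saida ++ [tupla]) acc
      = acc ++ ordContRuns l := by
  intro n
  induction n with
  | zero =>
    intro l hl
    have : l = [] := List.eq_nil_of_length_eq_zero (Nat.le_zero.mp hl)
    subst this
    intro _ _ acc _; simp [ordContRuns]
  | succ n ih =>
    intro l hl
    match l with
    | [] => intro _ _ acc _; simp [ordContRuns]
    | x :: xs =>
      intro hp hcnt acc hacc
      rw [List.pairwise_cons] at hp
      set r := xs.takeWhile (fun y => y == x) with hr
      set d := xs.dropWhile (fun y => y == x) with hd
      have hxs : r ++ d = xs := List.takeWhile_append_dropWhile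
      have hrall : ∀ e ∈ r, e = x := by
        intro e he
        have := List.mem_takeWhile_imp (l := xs) (p := fun y => y == x) (by rw [← hr]; exact he)
        simpa using this
      have hdlt : ∀ e ∈ d, e < x := pv_dropWhile_lt x xs hp.2 hp.1
      have hdmem : ∀ e ∈ d, e ∈ xs := by
        intro e he; rw [← hxs]; exact List.mem_append_right _ he
      -- the head tuple is fresh
      have hnotin : ((x, cnt x) : Int × Int) ∉ acc := by
        intro hmem
        exact hacc _ hmem x List.mem_cons_self rfl
      -- count of x in the whole list is 1 + the head-run length
      have hcx : cnt x = 1 + (r.length : Int) := by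
        have h0 : (x :: xs).count x = 1 + r.length + d.count x := by
          rw [← hxs]
          have hrc : r.count x = r.length := by
            rw [List.count_eq_length]
            intro e he; exact ((hrall e he) ▸ rfl)
          simp [List.count_append, hrc]
          omega
        have hdc : d.count x = 0 := by
          rw [List.count_eq_zero]
          intro hmem
          exact absurd rfl (ne_of_lt (hdlt x hmem))
        have := hcnt x List.mem_cons_self
        rw [this, h0, hdc]
        push_cast
        ring
      -- unfold one step of the fold
      simp only [List.foldl_cons, if_neg hnotin]
      rw [← hxs, List.foldl_append]
      rw [pv_fold_run cnt x r (acc ++ [(x, cnt x)]) hrall (by simp)]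
      -- apply the IH to the strictly-smaller remainder d
      have hdle : d.length ≤ xs.length := by
        rw [hd]; exact List.length_dropWhile_le _ _
      have hlen : d.length < (x :: xs).length := by
        simp only [List.length_cons]; omega
      have hpd : d.Pairwise (fun a b => b ≤ a) :=
        hp.2.sublist (List.dropWhile_sublist _)
      have hcntd : ∀ e ∈ d, cnt e = (d.count e : Int) := by
        intro e he
        have hex : e < x := hdlt e he
        have h1 : cnt e = ((x :: xs).count e : Int) := hcnt e (List.mem_cons_of_mem _ (hdmem e he))
        have h2 : (x :: xs).count e = d.count e := by
          rw [← hxs]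
          have hre : r.count e = 0 := by
            rw [List.count_eq_zero]
            intro hmem
            exact absurd (hrall e hmem) (ne_of_lt hex)
          simp [List.count_cons, List.count_append, hre]
          exact fun h => (ne_of_lt hex) h.symm
        rw [h1, h2]
      have haccd : ∀ p ∈ acc ++ [(x, cnt x)], ∀ e ∈ d, p.1 ≠ e := by
        intro p hpmem e he
        rcases List.mem_append.mp hpmem with h | h
        · exact hacc p h e (List.mem_cons_of_mem _ (hdmem e he))
        · simp at h
          subst h
          exact (ne_of_gt (hdlt e he))
      rw [ih d (by simp only [List.length_cons] at hl; omega) hpd hcntd (acc ++ [(x, cnt x)]) haccd]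
      -- assemble B's run step
      have hdrop : xs.drop r.length = d := by
        rw [← hxs, List.drop_append_of_le_length (le_refl _), List.drop_length, List.nil_append]
      rw [hxs]
      rw [ordContRuns, ← hr, hdrop, hcx]
      simp

-- ===== VERDICT (by name: the statement is the Claim_ definition above) =====
theorem ordCont_spec : Claim_equal_ordCont := by
  intro lista _
  unfold Spec_ordCont ordCont ordCont_alt
  set s := PySem.List.sorted lista (fun x => x) true with hs
  have hp : s.Pairwise (fun a b => b ≤ a) := by
    have := PySem.List.sorted_pairwise_rev (xs := lista) (key := fun x => x)
    simpa using this
  exact pv_main_aux (fun e => (s.count e : Int)) s.length s (le_refl _) hp (fun e _ => rfl) [] (by simp)
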